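-- pv_equiv track=rewrite | github.com/phy0x1a79ed/MetasmithLibraries | results/generate_report.py | parse_condition_from_label
-- ===== SOURCE A (Python) =====
-- CONDITIONS = ["8", "P", "S"]
--
-- TIMEPOINTS = [24, 72, 144]
--
-- def parse_condition_from_label(label):
--     """Parse condition from clean label like '8-24h-1' or '0h-2'."""
--     if label.startswith("0h"):
--         return "0h", 0
--     for c in CONDITIONS:
--         if label.startswith(f"{c}-"):
--             rest = label[len(c) + 1:]
--             for tp in TIMEPOINTS:
--                 if rest.startswith(f"{tp}h"):
--                     return c, tp
--     return None, None
-- ===== SOURCE B (Python) =====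
-- CONDITIONS = ["8", "P", "S"]
--
-- TIMEPOINTS = [24, 72, 144]
--
-- # Full condition-timepoint prefix table, built once.
-- _TABLE = {f"{c}-{tp}h": (c, tp) for c in CONDITIONS for tp in TIMEPOINTS}
--
-- def parse_condition_from_label(label):
--     """Parse condition from clean label like '8-24h-1' or '0h-2'."""
--     if label[:2] == "0h":
--         return "0h", 0
--     for n in (5, 6):  # "C-24h"/"C-72h" have length 5, "C-144h" length 6
--         hit = _TABLE.get(label[:n])
--         if hit is not None:
--             return hit
--     return None, None
-- ===== Notes on version B (the rewrite author's own statement) =====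
-- stated objective: alternative
-- what changed: Replaced the nested condition/timepoint startswith loops with a single dictionary, built once from the two constant lists, that maps each full condition-timepoint prefix to its result pair and is looked up on the label's 5- and 6-character prefixes (after the special zero-timepoint check).
import Mathlib
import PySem

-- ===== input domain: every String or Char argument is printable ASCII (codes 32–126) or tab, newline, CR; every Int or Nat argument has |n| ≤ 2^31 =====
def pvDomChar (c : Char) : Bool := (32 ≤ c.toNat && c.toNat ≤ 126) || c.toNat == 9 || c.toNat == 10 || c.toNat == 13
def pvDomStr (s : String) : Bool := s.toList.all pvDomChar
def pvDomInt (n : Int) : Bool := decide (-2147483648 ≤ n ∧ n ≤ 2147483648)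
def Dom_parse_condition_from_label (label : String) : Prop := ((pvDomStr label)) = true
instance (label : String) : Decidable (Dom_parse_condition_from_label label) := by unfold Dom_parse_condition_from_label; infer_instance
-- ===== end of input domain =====

-- B replaces A's nested condition/timepoint prefix loops with a single precomputed
-- "C-TPh" → (C, TP) table looked up on the label's 5- and 6-character prefixes (objective: alternative).

-- ===== PORT A =====
def pvTpLoop (c rest : String) : List Int → Option (String × Int)
  | [] => none
  | tp :: tps =>
      if PySem.Str.startswith rest (PySem.Int.toStr tp ++ "h") then some (c, tp)
      else pvTpLoop c rest tps

def pvCondLoop (label : String) : List String → Option String × Option Int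
  | [] => (none, none)
  | c :: cs =>
      if PySem.Str.startswith label (c ++ "-") then
        match pvTpLoop c (PySem.Str.slice label (some (PySem.Str.len c + 1)) none) [24, 72, 144] with
        | some r => (some r.1, some r.2)
        | none => pvCondLoop label cs
      else pvCondLoop label cs

def parse_condition_from_label (label : String) : Option String × Option Int :=
  if PySem.Str.startswith label "0h" then (some "0h", some 0)
  else pvCondLoop label ["8", "P", "S"]

-- ===== PORT B =====
def pvTable : PySem.Dict String (String × Int) :=
  PySem.Dict.ofList (["8", "P", "S"].flatMap (fun c =>
    ([24, 72, 144] : List Int).map (fun tp =>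
      (c ++ "-" ++ PySem.Int.toStr tp ++ "h", (c, tp)))))

def pvLenLoop (label : String) : List Int → Option String × Option Int
  | [] => (none, none)
  | n :: ns =>
      match pvTable.get? (PySem.Str.slice label none (some n)) with
      | some hit => (some hit.1, some hit.2)
      | none => pvLenLoop label ns

def parse_condition_from_label_alt (label : String) : Option String × Option Int :=
  if PySem.Str.slice label none (some 2) == "0h" then (some "0h", some 0)
  else pvLenLoop label [5, 6]

-- ===== PRECONDITION & SPEC =====
def Spec_parse_condition_from_label (label : String) (out : Option String × Option Int) : Prop := out = parse_condition_from_label_alt label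
instance (label : String) (out : Option String × Option Int) : Decidable (Spec_parse_condition_from_label label out) := by unfold Spec_parse_condition_from_label; infer_instance

-- ===== CLAIM (what is proved, stated in full; the proofs are below) =====
def Claim_equal_parse_condition_from_label : Prop := ∀ (label : String), Dom_parse_condition_from_label label → Spec_parse_condition_from_label label (parse_condition_from_label label)

-- ===== LEMMAS AND PROOFS =====

lemma pv_pre_app (p q l : List Char) : (p ++ q) <+: l ↔ p <+: l ∧ q <+: l.drop p.length := by
  induction p generalizing l with
  | nil => simp
  | cons a p ih =>
      cases l with
      | nil => simp
      | cons b t => simp [List.cons_prefix_cons, ih, and_assoc]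

lemma pv_take_eq_iff (n : Nat) (p l : List Char) (h : p.length = n) :
    l.take n = p ↔ p <+: l := by
  constructor
  · intro h'; exact h' ▸ List.take_prefix n l
  · intro h'
    rw [List.prefix_iff_eq_take] at h'
    rw [h] at h'
    exact h'.symm

lemma pv_head_pre {a b : Char} {p q l : List Char} (h1 : (a :: p) <+: l) (h2 : (b :: q) <+: l) :
    a = b := by
  obtain ⟨t, rfl⟩ := h1
  exact (List.cons_prefix_cons.mp h2).1.symm

lemma get_mk_nil {κ ν : Type} [BEq κ] (k : κ) : (PySem.Dict.mk ([] : List (κ × ν))).get? k = none := rfl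
lemma get_table (s : String) :
    pvTable.get? s =
      if ['8','-','2','4','h'] = s.toList then some ("8",24)
      else if ['8','-','7','2','h'] = s.toList then some ("8",72)
      else if ['8','-','1','4','4','h'] = s.toList then some ("8",144)
      else if ['P','-','2','4','h'] = s.toList then some ("P",24)
      else if ['P','-','7','2','h'] = s.toList then some ("P",72)
      else if ['P','-','1','4','4','h'] = s.toList then some ("P",144)
      else if ['S','-','2','4','h'] = s.toList then some ("S",24)
      else if ['S','-','7','2','h'] = s.toList then some ("S",72)
      else if ['S','-','1','4','4','h'] = s.toList then some ("S",144)
      else none := by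
  have ht : pvTable = PySem.Dict.mk [("8-24h",("8",24)),("8-72h",("8",72)),("8-144h",("8",144)),
    ("P-24h",("P",24)),("P-72h",("P",72)),("P-144h",("P",144)),
    ("S-24h",("S",24)),("S-72h",("S",72)),("S-144h",("S",144))] := by decide
  rw [ht]
  have e1 : ("8-24h" : String).toList = ['8','-','2','4','h'] := by decide
  have e2 : ("8-72h" : String).toList = ['8','-','7','2','h'] := by decide
  have e3 : ("8-144h" : String).toList = ['8','-','1','4','4','h'] := by decide
  have e4 : ("P-24h" : String).toList = ['P','-','2','4','h'] := by decide
  have e5 : ("P-72h" : String).toList = ['P','-','7','2','h'] := by decide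
  have e6 : ("P-144h" : String).toList = ['P','-','1','4','4','h'] := by decide
  have e7 : ("S-24h" : String).toList = ['S','-','2','4','h'] := by decide
  have e8 : ("S-72h" : String).toList = ['S','-','7','2','h'] := by decide
  have e9 : ("S-144h" : String).toList = ['S','-','1','4','4','h'] := by decide
  simp only [PySem.Dict.get?_mk_cons, get_mk_nil, beq_iff_eq, ← String.toList_inj,
    e1, e2, e3, e4, e5, e6, e7, e8, e9]

theorem pv_key (label : String) :
    parse_condition_from_label label = parse_condition_from_label_alt label := by
  have hrest : PySem.List.slice label.toList (some (2:Int)) none = label.toList.drop 2 := by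
    rw [PySem.List.slice_from _ (by norm_num)]; rfl
  have hs5 : PySem.List.slice label.toList none (some (5:Int)) = label.toList.take 5 := by
    rw [PySem.List.slice_to _ (by norm_num)]; rfl
  have hs6 : PySem.List.slice label.toList none (some (6:Int)) = label.toList.take 6 := by
    rw [PySem.List.slice_to _ (by norm_num)]; rfl
  have b0 : ((PySem.Str.slice label none (some 2) == "0h") = true) ↔
      ['0','h'] <+: label.toList := by
    rw [beq_iff_eq, ← String.toList_inj, PySem.Str.toList_slice, PySem.Chars.slice_eq_listSlice,
      PySem.List.slice_to _ (by norm_num)]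
    exact (pv_take_eq_iff 2 _ _ (by decide)).trans
      (by rw [show ("0h":String).toList = ['0','h'] from by decide])
  have k5 : ∀ (a b c : Char), ([a,'-',b,c,'h'] = label.toList.take 5) ↔
      ([a,'-'] <+: label.toList ∧ [b,c,'h'] <+: label.toList.drop 2) := by
    intro a b c
    rw [eq_comm, pv_take_eq_iff 5 _ _ (by simp),
      show [a,'-',b,c,'h'] = [a,'-'] ++ [b,c,'h'] from rfl, pv_pre_app]
    simp
  have k6 : ∀ (a : Char), ([a,'-','1','4','4','h'] = label.toList.take 6) ↔
      ([a,'-'] <+: label.toList ∧ ['1','4','4','h'] <+: label.toList.drop 2) := by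
    intro a
    rw [eq_comm, pv_take_eq_iff 6 _ _ (by simp),
      show [a,'-','1','4','4','h'] = [a,'-'] ++ ['1','4','4','h'] from rfl, pv_pre_app]
    simp
  have e0 : ("0h" : String).toList = ['0','h'] := by decide
  have ec8 : (("8" : String) ++ "-").toList = ['8','-'] := by decide
  have ecP : (("P" : String) ++ "-").toList = ['P','-'] := by decide
  have ecS : (("S" : String) ++ "-").toList = ['S','-'] := by decide
  have et24 : (PySem.Int.toStr 24 ++ "h").toList = ['2','4','h'] := by decide
  have et72 : (PySem.Int.toStr 72 ++ "h").toList = ['7','2','h'] := by decide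
  have et144 : (PySem.Int.toStr 144 ++ "h").toList = ['1','4','4','h'] := by decide
  have el8 : PySem.Str.len "8" + 1 = (2:Int) := by decide
  have elP : PySem.Str.len "P" + 1 = (2:Int) := by decide
  have elS : PySem.Str.len "S" + 1 = (2:Int) := by decide
  have k5x : ∀ (a b c : Char), ([a,'-',b,c,'h'] = label.toList.take 6) ↔
      ([a,'-'] <+: label.toList ∧ [b,c,'h'] <+: label.toList.drop 2 ∧ label.toList.length = 5) := by
    intro a b c
    constructor
    · intro h
      have hp : [a,'-',b,c,'h'] <+: label.toList := by rw [h]; exact List.take_prefix 6 _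
      have hl : (5:Nat) = min 6 label.toList.length := by
        simpa [List.length_take] using congrArg List.length h
      rw [show [a,'-',b,c,'h'] = [a,'-'] ++ [b,c,'h'] from rfl, pv_pre_app] at hp
      exact ⟨hp.1, by simpa using hp.2, by omega⟩
    · rintro ⟨hC, hT, hlen⟩
      have hp : [a,'-',b,c,'h'] <+: label.toList := by
        rw [show [a,'-',b,c,'h'] = [a,'-'] ++ [b,c,'h'] from rfl, pv_pre_app]
        exact ⟨hC, by simpa using hT⟩
      have := hp.eq_of_length (by simp [hlen])
      rw [this, List.take_of_length_le (by omega)]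
  have k6x : ∀ (a : Char), ([a,'-','1','4','4','h'] = label.toList.take 5) ↔ False := by
    intro a
    simp only [iff_false]
    intro h
    have hl : (6:Nat) = min 5 label.toList.length := by
      simpa [List.length_take] using congrArg List.length h
    omega
  by_cases h0 : ['0','h'] <+: label.toList
  · simp [parse_condition_from_label, parse_condition_from_label_alt, pvCondLoop, pvTpLoop,
      pvLenLoop, get_table, PySem.Chars.startswith_iff, *]
  · by_cases h8 : ['8','-'] <+: label.toList
    · have hnP : ¬(['P','-'] <+: label.toList) := fun h => absurd (pv_head_pre h8 h) (by decide)
      have hnS : ¬(['S','-'] <+: label.toList) := fun h => absurd (pv_head_pre h8 h) (by decide)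
      by_cases h24 : ['2','4','h'] <+: label.toList.drop 2
      · simp [parse_condition_from_label, parse_condition_from_label_alt, pvCondLoop, pvTpLoop,
          pvLenLoop, get_table, PySem.Chars.startswith_iff, *]
      · by_cases h72 : ['7','2','h'] <+: label.toList.drop 2
        · simp [parse_condition_from_label, parse_condition_from_label_alt, pvCondLoop, pvTpLoop,
            pvLenLoop, get_table, PySem.Chars.startswith_iff, *]
        · by_cases h144 : ['1','4','4','h'] <+: label.toList.drop 2
          · simp [parse_condition_from_label, parse_condition_from_label_alt, pvCondLoop, pvTpLoop,
              pvLenLoop, get_table, PySem.Chars.startswith_iff, *]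
          · simp [parse_condition_from_label, parse_condition_from_label_alt, pvCondLoop, pvTpLoop,
              pvLenLoop, get_table, PySem.Chars.startswith_iff, *]
    · by_cases hP : ['P','-'] <+: label.toList
      · have hnS : ¬(['S','-'] <+: label.toList) := fun h => absurd (pv_head_pre hP h) (by decide)
        by_cases h24 : ['2','4','h'] <+: label.toList.drop 2
        · simp [parse_condition_from_label, parse_condition_from_label_alt, pvCondLoop, pvTpLoop,
            pvLenLoop, get_table, PySem.Chars.startswith_iff, *]
        · by_cases h72 : ['7','2','h'] <+: label.toList.drop 2
          · simp [parse_condition_from_label, parse_condition_from_label_alt, pvCondLoop, pvTpLoop,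
              pvLenLoop, get_table, PySem.Chars.startswith_iff, *]
          · by_cases h144 : ['1','4','4','h'] <+: label.toList.drop 2
            · simp [parse_condition_from_label, parse_condition_from_label_alt, pvCondLoop, pvTpLoop,
                pvLenLoop, get_table, PySem.Chars.startswith_iff, *]
            · simp [parse_condition_from_label, parse_condition_from_label_alt, pvCondLoop, pvTpLoop,
                pvLenLoop, get_table, PySem.Chars.startswith_iff, *]
      · by_cases hS : ['S','-'] <+: label.toList
        · by_cases h24 : ['2','4','h'] <+: label.toList.drop 2
          · simp [parse_condition_from_label, parse_condition_from_label_alt, pvCondLoop, pvTpLoop,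
              pvLenLoop, get_table, PySem.Chars.startswith_iff, *]
          · by_cases h72 : ['7','2','h'] <+: label.toList.drop 2
            · simp [parse_condition_from_label, parse_condition_from_label_alt, pvCondLoop, pvTpLoop,
                pvLenLoop, get_table, PySem.Chars.startswith_iff, *]
            · by_cases h144 : ['1','4','4','h'] <+: label.toList.drop 2
              · simp [parse_condition_from_label, parse_condition_from_label_alt, pvCondLoop, pvTpLoop,
                  pvLenLoop, get_table, PySem.Chars.startswith_iff, *]
              · simp [parse_condition_from_label, parse_condition_from_label_alt, pvCondLoop, pvTpLoop,
                  pvLenLoop, get_table, PySem.Chars.startswith_iff, *]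
        · simp [parse_condition_from_label, parse_condition_from_label_alt, pvCondLoop, pvTpLoop,
            pvLenLoop, get_table, PySem.Chars.startswith_iff, *]

theorem parse_condition_from_label_spec : Claim_equal_parse_condition_from_label := by
  intro label _
  unfold Spec_parse_condition_from_label
  exact pv_key label
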